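-- pv_equiv track=rewrite | github.com/xjtu-enre/TSE2025SemArc | SemArc/algorithm/utils/utils.py | remap_result_dict
-- ===== SOURCE A (Python) =====
-- def remap_result_dict(result_dict):
--     result_ret = {}
--     val_set = set(result_dict.values())
--     val_set = sorted(list(val_set))
--     val_map = {v:i for i,v in enumerate(val_set)}
--     for f in result_dict:
--         result_ret[f] = val_map[result_dict[f]]
--     return result_ret
-- ===== SOURCE B (Python) =====
-- def remap_result_dict(result_dict):
--     distinct = set(result_dict.values())
--     return {k: sum(1 for u in distinct if u < v) for k, v in result_dict.items()}
-- ===== Notes on version B (the rewrite author's own statement) =====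
-- stated objective: alternative
-- what changed: B drops the sort + enumerate rank-table + second remap loop and instead computes each key's rank directly as the number of distinct values strictly smaller than its value, in one dict comprehension.
import Mathlib
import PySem

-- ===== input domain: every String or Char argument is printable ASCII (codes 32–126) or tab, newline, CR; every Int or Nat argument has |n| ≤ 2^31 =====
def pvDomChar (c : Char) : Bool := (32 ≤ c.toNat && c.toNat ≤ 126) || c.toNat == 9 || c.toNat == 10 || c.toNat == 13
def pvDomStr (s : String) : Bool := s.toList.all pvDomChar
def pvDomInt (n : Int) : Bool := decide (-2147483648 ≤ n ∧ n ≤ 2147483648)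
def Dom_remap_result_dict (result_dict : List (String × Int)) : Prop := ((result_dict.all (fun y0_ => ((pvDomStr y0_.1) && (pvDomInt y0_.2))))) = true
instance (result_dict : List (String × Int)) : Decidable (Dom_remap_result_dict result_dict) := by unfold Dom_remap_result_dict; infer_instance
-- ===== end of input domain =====

-- B replaces A's sort + enumerate rank-table + remap loop by counting, per key, the distinct
-- values strictly below its value (objective: alternative decomposition, same exact result).

-- ===== PORT A =====
-- Literal port of A. The association list stands for the Python dict, so it is first read as a
-- PySem.Dict. The two getD defaults are never used: `result_dict[f]` looks up a key of d and
-- `val_map[...]` looks up a value that is in val_set, so Python's KeyError path is unreachable.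
def remap_result_dict (result_dict : List (String × Int)) : List (String × Int) :=
  let d : PySem.Dict String Int := PySem.Dict.ofList result_dict
  let val_set : PySem.Set Int := PySem.Set.ofList (PySem.Dict.values d)
  let val_sorted : List Int := PySem.List.sorted val_set (fun x => x) false
  let val_map : PySem.Dict Int Int :=
    (PySem.List.enumerate val_sorted 0).foldl (fun m p => m.insert p.2 p.1) PySem.Dict.empty
  let result_ret : PySem.Dict String Int :=
    (PySem.Dict.keys d).foldl
      (fun acc f => acc.insert f (val_map.getD (d.getD f 0) 0)) PySem.Dict.empty
  result_ret.items

-- ===== PORT B =====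
-- Literal port of Source B: the 0/1-sum over the set is List.countP (order-independent, allowed on a Set).
def remap_result_dict_alt (result_dict : List (String × Int)) : List (String × Int) :=
  let d : PySem.Dict String Int := PySem.Dict.ofList result_dict
  let distinct : PySem.Set Int := PySem.Set.ofList (PySem.Dict.values d)
  (PySem.Dict.items d).map (fun p => (p.1, (distinct.countP (fun u => u < p.2) : Int)))

-- ===== PRECONDITION & SPEC =====
def Spec_remap_result_dict (result_dict : List (String × Int)) (out : List (String × Int)) : Prop := out = remap_result_dict_alt result_dict
instance (result_dict : List (String × Int)) (out : List (String × Int)) : Decidable (Spec_remap_result_dict result_dict out) := by unfold Spec_remap_result_dict; infer_instance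

-- ===== CLAIM (what is proved, stated in full; the proofs are below) =====
def Claim_equal_remap_result_dict : Prop := ∀ (result_dict : List (String × Int)), Dom_remap_result_dict result_dict → Spec_remap_result_dict result_dict (remap_result_dict result_dict)

-- ===== LEMMAS AND PROOFS =====

-- Inserting pairs none of whose keys is v leaves the lookup of v unchanged.
theorem pv_getD_foldl_insert_not_mem (ps : List (Int × Int)) (m : PySem.Dict Int Int)
    (v : Int) (h : ∀ p ∈ ps, p.2 ≠ v) :
    (ps.foldl (fun m p => m.insert p.2 p.1) m).getD v 0 = m.getD v 0 := by
  induction ps generalizing m with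
  | nil => rfl
  | cons q qs ih =>
      simp only [List.foldl_cons]
      rw [ih _ (fun p hp => h p (List.mem_cons_of_mem _ hp)),
          PySem.Dict.getD_insert_of_ne m q.1 0 (Ne.symm (h q List.mem_cons_self))]

-- In the rank table built from an enumerated strictly increasing list, the rank of v ∈ L is
-- (start index) + (number of elements of L below v).
theorem pv_rank_table (L : List Int) (hL : L.Pairwise (· < ·)) (s : Int)
    (m : PySem.Dict Int Int) (v : Int) (hv : v ∈ L) :
    ((PySem.List.enumerate L s).foldl (fun m p => m.insert p.2 p.1) m).getD v 0
      = s + (L.countP (fun u => u < v) : Int) := by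
  induction L generalizing s m with
  | nil => cases hv
  | cons x xs ih =>
      rw [PySem.List.enumerate_cons]
      simp only [List.foldl_cons]
      rcases List.pairwise_cons.mp hL with ⟨hx, hxs⟩
      by_cases hvx : v = x
      · subst hvx
        have hne : ∀ p ∈ PySem.List.enumerate xs (s + 1), p.2 ≠ v := by
          intro p hp
          have hmem : p.2 ∈ xs := by
            have hm := PySem.List.map_snd_enumerate xs (s + 1)
            rw [← hm]; exact List.mem_map_of_mem hp
          exact fun he => absurd (hx p.2 hmem) (by rw [he]; exact lt_irrefl v)
        rw [pv_getD_foldl_insert_not_mem _ _ _ hne, PySem.Dict.getD_insert_self]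
        have hc : (v :: xs).countP (fun u => decide (u < v)) = 0 := by
          rw [List.countP_eq_zero]
          intro a ha
          rcases List.mem_cons.mp ha with rfl | ha'
          · simp
          · simp only [decide_eq_true_eq]
            exact not_lt.mpr (le_of_lt (hx a ha'))
        rw [hc]; simp
      · have hv' : v ∈ xs := by
          rcases List.mem_cons.mp hv with h | h
          · exact absurd h hvx
          · exact h
        rw [ih hxs (s + 1) _ hv']
        have hc : (x :: xs).countP (fun u => decide (u < v))
            = xs.countP (fun u => decide (u < v)) + 1 := by
          rw [List.countP_cons]
          simp [hx v hv']
        rw [hc]; push_cast; ring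

theorem remap_eq (result_dict : List (String × Int)) :
    remap_result_dict result_dict = remap_result_dict_alt result_dict := by
  simp only [remap_result_dict, remap_result_dict_alt]
  set d := PySem.Dict.ofList result_dict with hd
  set vs : PySem.Set Int := PySem.Set.ofList (PySem.Dict.values d) with hvs
  set L : List Int := PySem.List.sorted vs (fun x => x) false with hLdef
  have hnd : (PySem.Dict.keys d).Nodup := PySem.Dict.nodup_keys_ofList result_dict
  -- A's output loop inserts fresh distinct keys into an empty dict, so it appends in key order.
  rw [PySem.Dict.items_foldl_insert_fresh (PySem.Dict.keys d) (fun f => f)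
        (fun f => ((PySem.List.enumerate L 0).foldl
            (fun m p => m.insert p.2 p.1) PySem.Dict.empty).getD (d.getD f 0) 0)
        PySem.Dict.empty
        (fun a _ => PySem.Dict.contains_empty a)
        (by simpa using hnd)]
  rw [PySem.Dict.items_eq_map_keys d hnd 0]
  simp only [List.map_map]
  have hemp : (PySem.Dict.empty : PySem.Dict String Int).items = [] := rfl
  rw [hemp, List.nil_append]
  apply List.map_congr_left
  intro f hf
  -- the value d.getD f 0 of a key f of d is one of d.values
  obtain ⟨p, hp, hfp⟩ := List.mem_map.mp (by simpa only [PySem.Dict.keys] using hf)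
  have hpair : (f, p.2) ∈ d.items := by rw [← hfp]; exact hp
  have hget : d.getD f 0 = p.2 := PySem.Dict.getD_of_mem_items d hpair hnd 0
  have hvmem : d.getD f 0 ∈ PySem.Dict.values d := by
    rw [hget]
    simp only [PySem.Dict.values]
    exact List.mem_map_of_mem hp
  have hvL : d.getD f 0 ∈ L :=
    (PySem.List.mem_sorted vs (fun x => x) false _).mpr (by rw [hvs]; exact (PySem.Set.mem_ofList (PySem.Dict.values d) _).mpr hvmem)
  have hstrict : L.Pairwise (· < ·) := by
    rw [hLdef, hvs]; exact PySem.List.sorted_ofList_pairwise_lt (PySem.Dict.values d)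
  rw [pv_rank_table L hstrict 0 _ _ hvL]
  have hperm : L.Perm vs := PySem.List.sorted_perm vs (fun x => x) false
  rw [hperm.countP_eq]
  simp

-- ===== VERDICT (by name: the statement is the Claim_ definition above) =====
theorem remap_result_dict_spec : Claim_equal_remap_result_dict := by
  intro rd _
  exact remap_eq rd
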